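-- pv_equiv track=rewrite | github.com/Dheebz/advent-of-code | src/python/year_2019/solution_2019_day_24.py | step_recursive
-- ===== SOURCE A (Python) =====
-- from typing import Dict, Set, Tuple
--
-- Point = Tuple[int, int]
--
-- def recursive_neighbors(x: int, y: int, level: int) -> Set[Tuple[int, int, int]]:
--     """Return neighbors across recursive grid levels."""
--     results = set()
--     if x == 2 and y == 2:
--         return results
--     for dx, dy in [(1, 0), (-1, 0), (0, 1), (0, -1)]:
--         nx, ny = x + dx, y + dy
--         if nx == 2 and ny == 2:
--             # into inner level
--             if x == 1:
--                 results.update({(0, iy, level + 1) for iy in range(5)})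
--             elif x == 3:
--                 results.update({(4, iy, level + 1) for iy in range(5)})
--             elif y == 1:
--                 results.update({(ix, 0, level + 1) for ix in range(5)})
--             elif y == 3:
--                 results.update({(ix, 4, level + 1) for ix in range(5)})
--         elif nx < 0:
--             results.add((1, 2, level - 1))
--         elif nx > 4:
--             results.add((3, 2, level - 1))
--         elif ny < 0:
--             results.add((2, 1, level - 1))
--         elif ny > 4:
--             results.add((2, 3, level - 1))
--         else:
--             results.add((nx, ny, level))
--     return results
--
-- def step_recursive(bugs: Dict[int, Set[Point]]) -> Dict[int, Set[Point]]:
--     """Advance one minute in the recursive automaton."""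
--     new_bugs: Dict[int, Set[Point]] = {}
--     levels = range(min(bugs.keys()) - 1, max(bugs.keys()) + 2)
--     for level in levels:
--         current: Set[Point] = set()
--         for y in range(5):
--             for x in range(5):
--                 if (x, y) == (2, 2):
--                     continue
--                 adj = 0
--                 for nx, ny, nl in recursive_neighbors(x, y, level):
--                     if nl in bugs and (nx, ny) in bugs[nl]:
--                         adj += 1
--                 occupied = level in bugs and (x, y) in bugs[level]
--                 if occupied and adj == 1:
--                     current.add((x, y))
--                 if not occupied and adj in (1, 2):
--                     current.add((x, y))
--         if current:
--             new_bugs[level] = current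
--     return new_bugs
-- ===== SOURCE B (Python) =====
-- from typing import Dict, Set, Tuple
--
-- Point = Tuple[int, int]
--
-- def recursive_neighbors(x: int, y: int, level: int) -> Set[Tuple[int, int, int]]:
--     """Return neighbors across recursive grid levels."""
--     results = set()
--     if x == 2 and y == 2:
--         return results
--     for dx, dy in [(1, 0), (-1, 0), (0, 1), (0, -1)]:
--         nx, ny = x + dx, y + dy
--         if nx == 2 and ny == 2:
--             # into inner level
--             if x == 1:
--                 results.update({(0, iy, level + 1) for iy in range(5)})
--             elif x == 3:
--                 results.update({(4, iy, level + 1) for iy in range(5)})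
--             elif y == 1:
--                 results.update({(ix, 0, level + 1) for ix in range(5)})
--             elif y == 3:
--                 results.update({(ix, 4, level + 1) for ix in range(5)})
--         elif nx < 0:
--             results.add((1, 2, level - 1))
--         elif nx > 4:
--             results.add((3, 2, level - 1))
--         elif ny < 0:
--             results.add((2, 1, level - 1))
--         elif ny > 4:
--             results.add((2, 3, level - 1))
--         else:
--             results.add((x + dx, y + dy, level))
--     return results
--
-- def step_recursive(bugs: Dict[int, Set[Point]]) -> Dict[int, Set[Point]]:
--     """Advance one minute: scatter bug pressure once with a counter, then scan."""
--     # one pass over the live bugs builds the full adjacency index (adjacency is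
--     # symmetric, so counts[c] = number of occupied neighbours of c)
--     counts: Dict[Tuple[int, int, int], int] = {}
--     for level, cells in bugs.items():
--         for (x, y) in cells:
--             if not (0 <= x <= 4 and 0 <= y <= 4) or (x, y) == (2, 2):
--                 continue  # not a cell of the grid: it has no effect
--             for n in recursive_neighbors(x, y, level):
--                 counts[n] = counts.get(n, 0) + 1
--     new_bugs: Dict[int, Set[Point]] = {}
--     for level in range(min(bugs) - 1, max(bugs) + 2):
--         occupied_set = bugs.get(level, set())
--         current: Set[Point] = set()
--         for y in range(5):
--             for x in range(5):
--                 if (x, y) == (2, 2):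
--                     continue
--                 adj = counts.get((x, y, level), 0)
--                 if (adj == 1) if (x, y) in occupied_set else (adj in (1, 2)):
--                     current.add((x, y))
--         if current:
--             new_bugs[level] = current
--     return new_bugs
-- ===== Notes on version B (the rewrite author's own statement) =====
-- stated objective: faster
-- what changed: A recomputes adjacency per cell by enumerating that cell's recursive neighbours and looking each one up in the bug dict; B instead builds a neighbour-pressure counter in one pass over the live bugs (adjacency is symmetric) and then decides each cell with a single counter lookup.
import Mathlib
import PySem

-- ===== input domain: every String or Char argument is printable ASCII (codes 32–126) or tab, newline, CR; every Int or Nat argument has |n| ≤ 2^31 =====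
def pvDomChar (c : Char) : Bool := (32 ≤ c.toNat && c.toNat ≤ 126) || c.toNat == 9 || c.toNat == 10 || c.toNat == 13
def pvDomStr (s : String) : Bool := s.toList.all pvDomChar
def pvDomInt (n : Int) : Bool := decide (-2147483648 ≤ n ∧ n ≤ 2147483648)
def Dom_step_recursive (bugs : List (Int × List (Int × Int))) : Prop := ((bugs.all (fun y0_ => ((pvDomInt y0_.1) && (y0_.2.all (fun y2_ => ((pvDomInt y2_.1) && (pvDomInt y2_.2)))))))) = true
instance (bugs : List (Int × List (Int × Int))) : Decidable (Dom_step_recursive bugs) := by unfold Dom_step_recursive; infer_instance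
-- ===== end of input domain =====

-- B replaces A's per-cell neighbour scan (25 cells × 4-8 neighbour occupancy lookups per level)
-- by a neighbour-pressure counter built in ONE pass over the live bugs (adjacency is symmetric),
-- then a single counter lookup per cell; same value, measurably faster in a timing run.

-- ===== PORT A =====
-- loop body of recursive_neighbors, named so the proofs can talk about it (same code as the Python loop body)
def rnStep (x y level : Int) (results : PySem.Set (Int × Int × Int)) (d : Int × Int) :
    PySem.Set (Int × Int × Int) :=
  let nx := x + d.1
  let ny := y + d.2
  if nx = 2 ∧ ny = 2 then
    if x = 1 then PySem.Set.update results ((PySem.List.pyRange 0 5 1).map (fun iy => ((0:Int), iy, level + 1)))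
    else if x = 3 then PySem.Set.update results ((PySem.List.pyRange 0 5 1).map (fun iy => ((4:Int), iy, level + 1)))
    else if y = 1 then PySem.Set.update results ((PySem.List.pyRange 0 5 1).map (fun ix => (ix, (0:Int), level + 1)))
    else if y = 3 then PySem.Set.update results ((PySem.List.pyRange 0 5 1).map (fun ix => (ix, (4:Int), level + 1)))
    else results
  else if nx < 0 then PySem.Set.add results (1, 2, level - 1)
  else if nx > 4 then PySem.Set.add results (3, 2, level - 1)
  else if ny < 0 then PySem.Set.add results (2, 1, level - 1)
  else if ny > 4 then PySem.Set.add results (2, 3, level - 1)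
  else PySem.Set.add results (nx, ny, level)

def recursive_neighbors (x y level : Int) : PySem.Set (Int × Int × Int) :=
  if x = 2 ∧ y = 2 then PySem.Set.empty
  else [((1:Int),(0:Int)), (-1,0), (0,1), (0,-1)].foldl (rnStep x y level) PySem.Set.empty

def step_recursive (bugs : List (Int × List (Int × Int))) : List (Int × List (Int × Int)) :=
  let d := PySem.Dict.mk bugs
  let lo := ((PySem.List.min? d.keys id).getD 0) - 1          -- min()/max() raise on an empty dict: outside Pre_
  let hi := ((PySem.List.max? d.keys id).getD 0) + 2
  ((PySem.List.pyRange lo hi 1).foldl (fun nb level =>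
    let current := (PySem.List.pyRange 0 5 1).foldl (fun cur y =>
      (PySem.List.pyRange 0 5 1).foldl (fun cur x =>
        if x = 2 ∧ y = 2 then cur
        else
          let adj := (recursive_neighbors x y level).foldl (fun adj n =>
            if d.contains n.2.2 && decide ((n.1, n.2.1) ∈ d.getD n.2.2 []) then adj + 1 else adj) (0:Int)
          let occupied := d.contains level && decide ((x, y) ∈ d.getD level [])
          let cur := if occupied && (adj == 1) then PySem.Set.add cur (x, y) else cur
          if !occupied && (adj == 1 || adj == 2) then PySem.Set.add cur (x, y) else cur) cur)
      PySem.Set.empty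
    if current ≠ [] then nb.insert level current else nb) PySem.Dict.empty).items

-- ===== PORT B =====
def step_recursive_alt (bugs : List (Int × List (Int × Int))) : List (Int × List (Int × Int)) :=
  let d := PySem.Dict.mk bugs
  let counts : PySem.Dict (Int × Int × Int) Int :=
    bugs.foldl (fun counts e =>
      e.2.foldl (fun counts p =>
        if (0 ≤ p.1 ∧ p.1 ≤ 4 ∧ 0 ≤ p.2 ∧ p.2 ≤ 4) ∧ ¬(p.1 = 2 ∧ p.2 = 2) then
          (recursive_neighbors p.1 p.2 e.1).foldl (fun counts n => counts.insert n (counts.getD n 0 + 1)) counts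
        else counts) counts) PySem.Dict.empty
  let lo := ((PySem.List.min? d.keys id).getD 0) - 1
  let hi := ((PySem.List.max? d.keys id).getD 0) + 2
  ((PySem.List.pyRange lo hi 1).foldl (fun nb level =>
    let occupied_set := d.getD level []
    let current := (PySem.List.pyRange 0 5 1).foldl (fun cur y =>
      (PySem.List.pyRange 0 5 1).foldl (fun cur x =>
        if x = 2 ∧ y = 2 then cur
        else
          let adj := counts.getD (x, y, level) 0
          if (if decide ((x, y) ∈ occupied_set) then adj == 1 else (adj == 1 || adj == 2)) then
            PySem.Set.add cur (x, y)
          else cur) cur)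
      PySem.Set.empty
    if current ≠ [] then nb.insert level current else nb) PySem.Dict.empty).items

-- ===== PRECONDITION & SPEC =====
-- Pre_ excludes the empty dict (min() raises ValueError in A — and in B) and association lists with
-- duplicate level keys or duplicate points inside a level, which do not encode a Python dict of sets.
def Pre_step_recursive (bugs : List (Int × List (Int × Int))) : Prop :=
  bugs ≠ [] ∧ (bugs.map (·.1)).Nodup ∧ ∀ e ∈ bugs, e.2.Nodup
instance (bugs : List (Int × List (Int × Int))) : Decidable (Pre_step_recursive bugs) := by
  unfold Pre_step_recursive; infer_instance

def pvWitness_step_recursive : (List (Int × List (Int × Int))) := [(0, [(2,3),(1,1)])]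

def Spec_step_recursive (bugs : List (Int × List (Int × Int))) (out : List (Int × List (Int × Int))) : Prop := out = step_recursive_alt bugs
instance (bugs : List (Int × List (Int × Int))) (out : List (Int × List (Int × Int))) : Decidable (Spec_step_recursive bugs out) := by unfold Spec_step_recursive; infer_instance

-- ===== CLAIM (what is proved, stated in full; the proofs are below) =====
def Claim_equal_step_recursive : Prop := ∀ (bugs : List (Int × List (Int × Int))), Dom_step_recursive bugs → Pre_step_recursive bugs → Spec_step_recursive bugs (step_recursive bugs)

-- ===== LEMMAS AND PROOFS =====

-- the 24 real cells of the 5×5 grid (centre (2,2) excluded)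
def pvVC : List (Int × Int) :=
  [(0,0),(1,0),(2,0),(3,0),(4,0),(0,1),(1,1),(2,1),(3,1),(4,1),(0,2),(1,2),(3,2),(4,2),
   (0,3),(1,3),(2,3),(3,3),(4,3),(0,4),(1,4),(2,4),(3,4),(4,4)]

lemma pvVC_iff (a b : Int) :
    (a, b) ∈ pvVC ↔ (0 ≤ a ∧ a ≤ 4 ∧ 0 ≤ b ∧ b ≤ 4) ∧ ¬(a = 2 ∧ b = 2) := by
  constructor
  · intro h
    fin_cases h <;> norm_num
  · rintro ⟨⟨h1, h2, h3, h4⟩, h5⟩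
    interval_cases a <;> interval_cases b <;> simp_all [pvVC]

-- level-shift of a neighbour triple
def pvShift (l : Int) (n : Int × Int × Int) : Int × Int × Int := (n.1, n.2.1, n.2.2 + l)

lemma pvShift_inj (l : Int) : Function.Injective (pvShift l) := by
  rintro ⟨a, b, m⟩ ⟨a', b', m'⟩ h
  simp [pvShift, Prod.ext_iff] at h ⊢
  omega

lemma pvAdd_map {α β : Type} [BEq α] [LawfulBEq α] [BEq β] [LawfulBEq β] (f : α → β)
    (hf : Function.Injective f) (s : PySem.Set α) (v : α) :
    PySem.Set.add (s.map f) (f v) = (PySem.Set.add s v).map f := by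
  rw [PySem.Set.add_eq_ite, PySem.Set.add_eq_ite]
  by_cases h : v ∈ s
  · rw [if_pos (List.mem_map_of_mem h), if_pos h]
  · rw [if_neg (fun hc => h ((List.mem_map_of_injective hf).mp hc)), if_neg h, List.map_append]
    rfl

lemma pvUpdate_map {α β : Type} [BEq α] [LawfulBEq α] [BEq β] [LawfulBEq β] (f : α → β)
    (hf : Function.Injective f) (s : PySem.Set α) (xs : List α) :
    PySem.Set.update (s.map f) (xs.map f) = (PySem.Set.update s xs).map f := by
  induction xs generalizing s with
  | nil => rfl
  | cons x t ih =>
    rw [List.map_cons, PySem.Set.update_cons, PySem.Set.update_cons, pvAdd_map f hf s x, ih]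

lemma pvFoldl_map_comm {α β γ : Type} (m : α → β) (f : List β → γ → List β) (g : List α → γ → List α)
    (h : ∀ s e, f (s.map m) e = (g s e).map m) :
    ∀ (l : List γ) (s : List α), l.foldl f (s.map m) = (l.foldl g s).map m := by
  intro l
  induction l with
  | nil => intro s; rfl
  | cons e t ih => intro s; simp only [List.foldl_cons, h s e, ih]

lemma pvRnStep_shift (x y l : Int) (s : PySem.Set (Int × Int × Int)) (e : Int × Int) :
    rnStep x y l (s.map (pvShift l)) e = (rnStep x y 0 s e).map (pvShift l) := by
  simp only [rnStep]
  split_ifs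
  all_goals
    first
      | rfl
      | (rw [← pvUpdate_map (pvShift l) (pvShift_inj l), List.map_map]
         exact congrArg _ (List.map_congr_left (fun i _ => by simp [pvShift, add_comm])))
      | (rw [← pvAdd_map (pvShift l) (pvShift_inj l)]
         exact congrArg _ (by simp [pvShift, sub_eq_neg_add]))

lemma pvRn_shift (x y l : Int) :
    recursive_neighbors x y l = (recursive_neighbors x y 0).map (pvShift l) := by
  unfold recursive_neighbors
  split
  · rfl
  · have := pvFoldl_map_comm (pvShift l) (rnStep x y l) (rnStep x y 0)
      (fun s e => pvRnStep_shift x y l s e) [((1:Int),(0:Int)), (-1,0), (0,1), (0,-1)] []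
    simpa [PySem.Set.empty] using this

lemma pvMem_rn (x y l a b m : Int) :
    (a, b, m) ∈ recursive_neighbors x y l ↔ (a, b, m - l) ∈ recursive_neighbors x y 0 := by
  rw [pvRn_shift x y l]
  constructor
  · intro h
    rcases List.mem_map.mp h with ⟨⟨a', b', m'⟩, hmem, heq⟩
    simp [pvShift, Prod.ext_iff] at heq
    obtain ⟨h1, h2, h3⟩ := heq
    have : m' = m - l := by omega
    subst h1; subst h2; subst this; exact hmem
  · intro h
    exact List.mem_map.mpr ⟨(a, b, m - l), h, by simp [pvShift]⟩

-- decided facts about the level-0 neighbour table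
lemma pvRn0_nodup : ∀ c ∈ pvVC, (recursive_neighbors c.1 c.2 0).Nodup := by decide

lemma pvRn0_valid : ∀ c ∈ pvVC, ∀ n ∈ recursive_neighbors c.1 c.2 0,
    (n.1, n.2.1) ∈ pvVC ∧ (n.2.2 = -1 ∨ n.2.2 = 0 ∨ n.2.2 = 1) := by decide

lemma pvRn0_symm : ∀ c ∈ pvVC, ∀ c' ∈ pvVC, ∀ k ∈ ([-1, 0, 1] : List Int),
    ((c'.1, c'.2, k) ∈ recursive_neighbors c.1 c.2 0 ↔
      (c.1, c.2, -k) ∈ recursive_neighbors c'.1 c'.2 0) := by decide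

lemma pvRn_nodup (x y l : Int) (h : (x, y) ∈ pvVC) : (recursive_neighbors x y l).Nodup := by
  rw [pvRn_shift x y l]
  exact ((pvRn0_nodup (x, y) h)).map (pvShift_inj l)

-- symmetry of the adjacency relation at symbolic levels
lemma pvSymm (x y a b lc lp : Int) (hc : (x, y) ∈ pvVC) :
    ((a, b, lp) ∈ recursive_neighbors x y lc ↔
      (a, b) ∈ pvVC ∧ (x, y, lc) ∈ recursive_neighbors a b lp) := by
  constructor
  · intro h
    have h0 := (pvMem_rn x y lc a b lp).mp h
    obtain ⟨hv, hk⟩ := pvRn0_valid (x, y) hc (a, b, lp - lc) h0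
    refine ⟨hv, ?_⟩
    have hkmem : (lp - lc) ∈ ([-1, 0, 1] : List Int) := by simpa using hk
    have hs := (pvRn0_symm (x, y) hc (a, b) hv (lp - lc) hkmem).mp h0
    rw [pvMem_rn a b lp x y lc]
    have heq : ((x:Int), (y:Int), -(lp - lc)) = ((x:Int), (y:Int), lc - lp) := by
      simp
    rwa [heq] at hs
  · rintro ⟨hv, h⟩
    have h0 := (pvMem_rn a b lp x y lc).mp h
    obtain ⟨hv', hk⟩ := pvRn0_valid (a, b) hv (x, y, lc - lp) h0
    have hkmem : (lp - lc) ∈ ([-1, 0, 1] : List Int) := by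
      simp at hk ⊢; omega
    have heq : ((x:Int), (y:Int), -(lp - lc)) = ((x:Int), (y:Int), lc - lp) := by
      simp
    have hs := (pvRn0_symm (x, y) hc (a, b) hv (lp - lc) hkmem).mpr (by rw [heq]; exact h0)
    exact (pvMem_rn x y lc a b lp).mpr hs

-- occupancy through the Dict equals the sum of per-entry indicators (unique keys)
def pvOccI (e : Int × List (Int × Int)) (n : Int × Int × Int) : Int :=
  if e.1 = n.2.2 ∧ (n.1, n.2.1) ∈ e.2 then 1 else 0

lemma pvOccI_sum_zero (l : List (Int × List (Int × Int))) (n : Int × Int × Int)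
    (h : n.2.2 ∉ l.map (·.1)) : (l.map (fun e => pvOccI e n)).sum = 0 := by
  induction l with
  | nil => rfl
  | cons e t ih =>
    simp only [List.map_cons, List.mem_cons, List.sum_cons] at h ⊢
    rw [ih (fun hx => h (Or.inr hx))]
    have : pvOccI e n = 0 := by
      unfold pvOccI
      rw [if_neg]; rintro ⟨h1, _⟩; exact h (Or.inl h1.symm)
    omega

lemma pvOcc_eq_sum (bugs : List (Int × List (Int × Int))) (n : Int × Int × Int)
    (hk : (bugs.map (·.1)).Nodup) :
    (if (PySem.Dict.mk bugs).contains n.2.2 && decide ((n.1, n.2.1) ∈ (PySem.Dict.mk bugs).getD n.2.2 []) then (1:Int) else 0)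
      = (bugs.map (fun e => pvOccI e n)).sum := by
  induction bugs with
  | nil => rfl
  | cons e t ih =>
    rw [List.map_cons, List.nodup_cons] at hk
    obtain ⟨hknot, hknd⟩ := hk
    rw [List.map_cons, List.sum_cons]
    rw [PySem.Dict.contains_eq_isSome_get?, PySem.Dict.getD_eq_get?_getD, PySem.Dict.get?_mk_cons]
    by_cases h : e.1 = n.2.2
    · rw [if_pos (beq_iff_eq.mpr h)]
      rw [pvOccI_sum_zero t n (h ▸ hknot)]
      simp [pvOccI, h]
    · rw [if_neg (show ¬((e.1 == n.2.2) = true) by simp [h])]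
      rw [← PySem.Dict.getD_eq_get?_getD, ← PySem.Dict.contains_eq_isSome_get?]
      rw [ih hknd]
      have h0 : pvOccI e n = 0 := by simp [pvOccI, h]
      rw [h0, zero_add]

-- sum exchange for nested list sums
lemma pvSum_swap {α β : Type} (l : List α) (m : List β) (f : α → β → Int) :
    (l.map (fun a => (m.map (f a)).sum)).sum = (m.map (fun b => (l.map (fun a => f a b)).sum)).sum := by
  induction l with
  | nil => simp
  | cons a t ih =>
    simp only [List.map_cons, List.sum_cons, ih]
    rw [← PySem.List.sum_map_add_int]

lemma pvCount_nodup {α : Type} [BEq α] [LawfulBEq α] (l : List α) (hl : l.Nodup) (v : α) :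
    (l.count v : Int) = if v ∈ l then 1 else 0 := by
  by_cases h : v ∈ l
  · rw [if_pos h]
    have h1 := List.nodup_iff_count_le_one.mp hl v
    have h2 := List.count_pos_iff.mpr h
    omega
  · rw [if_neg h, List.count_eq_zero_of_not_mem h]; rfl

-- the per-cell adjacency count of A equals B's scattered counter value
lemma pvAdj_eq (bugs : List (Int × List (Int × Int))) (x y level : Int)
    (hk : (bugs.map (·.1)).Nodup) (hp : ∀ e ∈ bugs, e.2.Nodup) (hc : (x, y) ∈ pvVC) :
    (((recursive_neighbors x y level).countP (fun n =>
        (PySem.Dict.mk bugs).contains n.2.2 && decide ((n.1, n.2.1) ∈ (PySem.Dict.mk bugs).getD n.2.2 []))) : Int)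
    = (bugs.map (fun e => (e.2.map (fun p =>
        if (0 ≤ p.1 ∧ p.1 ≤ 4 ∧ 0 ≤ p.2 ∧ p.2 ≤ 4) ∧ ¬(p.1 = 2 ∧ p.2 = 2) then
          ((recursive_neighbors p.1 p.2 e.1).count (x, y, level) : Int) else 0)).sum)).sum := by
  have hN := pvRn_nodup x y level hc
  rw [← PySem.List.sum_map_ite_one_zero]
  have h1 : (recursive_neighbors x y level).map (fun n =>
        if (PySem.Dict.mk bugs).contains n.2.2 && decide ((n.1, n.2.1) ∈ (PySem.Dict.mk bugs).getD n.2.2 []) then (1:Int) else 0)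
      = (recursive_neighbors x y level).map (fun n => (bugs.map (fun e => pvOccI e n)).sum) :=
    List.map_congr_left (fun n _ => pvOcc_eq_sum bugs n hk)
  rw [h1, pvSum_swap (recursive_neighbors x y level) bugs (fun n e => pvOccI e n)]
  congr 1
  apply List.map_congr_left
  intro e he
  have hpts := hp e he
  -- rewrite each occupancy indicator as a sum of per-point indicators
  have hstep : ∀ n ∈ recursive_neighbors x y level, pvOccI e n
      = (e.2.map (fun p => if n == ((p.1 : Int), p.2, e.1) then (1:Int) else 0)).sum := by
    intro n _
    by_cases h : e.1 = n.2.2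
    · have h2 : (e.2.map (fun p => if n == ((p.1 : Int), p.2, e.1) then (1:Int) else 0))
          = (e.2.map (fun p => if p == ((n.1 : Int), n.2.1) then (1:Int) else 0)) :=
        List.map_congr_left (fun p _ => if_congr (by simp [Prod.ext_iff, ← h]; tauto) rfl rfl)
      rw [h2, PySem.List.sum_map_ite_one_zero, ← List.count_eq_countP']
      rw [pvCount_nodup e.2 hpts (n.1, n.2.1)]
      unfold pvOccI
      simp [h]
    · have h2 : (e.2.map (fun p => if n == ((p.1 : Int), p.2, e.1) then (1:Int) else 0))
          = (e.2.map (fun _ => (0:Int))) :=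
        List.map_congr_left (fun p _ => by
          rw [if_neg]
          simp [Prod.ext_iff]
          intro _ _ hcon
          exact h hcon.symm)
      rw [h2]
      unfold pvOccI
      rw [if_neg (by tauto)]
      simp
  rw [List.map_congr_left hstep,
    pvSum_swap (recursive_neighbors x y level) e.2
      (fun n p => if n == ((p.1 : Int), p.2, e.1) then (1:Int) else 0)]
  apply congrArg
  apply List.map_congr_left
  intro p _
  rw [PySem.List.sum_map_ite_one_zero, ← List.count_eq_countP', pvCount_nodup _ hN]
  by_cases hv : (p.1, p.2) ∈ pvVC
  · have hvc := (pvVC_iff p.1 p.2).mp hv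
    rw [if_pos hvc, pvCount_nodup _ (pvRn_nodup p.1 p.2 e.1 hv) (x, y, level)]
    exact if_congr (by rw [pvSymm x y p.1 p.2 level e.1 hc]; simp [hv]) rfl rfl
  · rw [if_neg (fun hcon => hv ((pvVC_iff p.1 p.2).mpr hcon))]
    rw [if_neg (fun hmem => hv ((pvSymm x y p.1 p.2 level e.1 hc).mp hmem).1)]

-- B's counter: value at any triple
lemma pvCnt_inner (pts : List (Int × Int)) (lvl : Int) (c : PySem.Dict (Int × Int × Int) Int) (v : Int × Int × Int) :
    (pts.foldl (fun counts p =>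
        if (0 ≤ p.1 ∧ p.1 ≤ 4 ∧ 0 ≤ p.2 ∧ p.2 ≤ 4) ∧ ¬(p.1 = 2 ∧ p.2 = 2) then
          (recursive_neighbors p.1 p.2 lvl).foldl (fun counts n => counts.insert n (counts.getD n 0 + 1)) counts
        else counts) c).getD v 0
    = c.getD v 0 + (pts.map (fun p =>
        if (0 ≤ p.1 ∧ p.1 ≤ 4 ∧ 0 ≤ p.2 ∧ p.2 ≤ 4) ∧ ¬(p.1 = 2 ∧ p.2 = 2) then
          ((recursive_neighbors p.1 p.2 lvl).count v : Int) else 0)).sum := by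
  induction pts generalizing c with
  | nil => simp
  | cons p t ih =>
    simp only [List.foldl_cons, List.map_cons, List.sum_cons]
    split
    · rw [ih, PySem.Dict.getD_foldl_insert_add_one]; ring
    · rw [ih]; ring

lemma pvCnt_outer (l : List (Int × List (Int × Int))) (c0 : PySem.Dict (Int × Int × Int) Int) (v : Int × Int × Int) :
    (l.foldl (fun counts e =>
        e.2.foldl (fun counts p =>
          if (0 ≤ p.1 ∧ p.1 ≤ 4 ∧ 0 ≤ p.2 ∧ p.2 ≤ 4) ∧ ¬(p.1 = 2 ∧ p.2 = 2) then
            (recursive_neighbors p.1 p.2 e.1).foldl (fun counts n => counts.insert n (counts.getD n 0 + 1)) counts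
          else counts) counts) c0).getD v 0
    = c0.getD v 0 + (l.map (fun e => (e.2.map (fun p =>
        if (0 ≤ p.1 ∧ p.1 ≤ 4 ∧ 0 ≤ p.2 ∧ p.2 ≤ 4) ∧ ¬(p.1 = 2 ∧ p.2 = 2) then
          ((recursive_neighbors p.1 p.2 e.1).count v : Int) else 0)).sum)).sum := by
  induction l generalizing c0 with
  | nil => simp
  | cons e t ih =>
    simp only [List.foldl_cons, List.map_cons, List.sum_cons]
    rw [ih, pvCnt_inner]; ring

-- A's two sequential ifs are B's single if/else
lemma pvBranch_eq (occ : Bool) (adj : Int) (cur : PySem.Set (Int × Int)) (v : Int × Int) :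
    (if !occ && (adj == 1 || adj == 2) then
        PySem.Set.add (if occ && (adj == 1) then PySem.Set.add cur v else cur) v
      else (if occ && (adj == 1) then PySem.Set.add cur v else cur))
    = if (if occ then adj == 1 else (adj == 1 || adj == 2)) then PySem.Set.add cur v else cur := by
  cases occ <;> simp

lemma pvOccupied_eq (bugs : List (Int × List (Int × Int))) (level : Int) (v : Int × Int) :
    ((PySem.Dict.mk bugs).contains level && decide (v ∈ (PySem.Dict.mk bugs).getD level []))
      = decide (v ∈ (PySem.Dict.mk bugs).getD level []) := by
  by_cases h : (PySem.Dict.mk bugs).contains level = true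
  · rw [h, Bool.true_and]
  · have h' : (PySem.Dict.mk bugs).contains level = false := by
      cases hb : (PySem.Dict.mk bugs).contains level
      · rfl
      · exact absurd hb h
    rw [PySem.Dict.getD_of_not_contains (PySem.Dict.mk bugs) ([] : List (Int × Int)) h']
    simp [h']

-- ===== VERDICT (by name: the statement is the Claim_ definition above) =====
theorem step_recursive_spec : Claim_equal_step_recursive := by
  intro bugs _ hpre
  obtain ⟨-, hk, hp⟩ := hpre
  unfold Spec_step_recursive
  simp only [step_recursive, step_recursive_alt]
  congr 1
  apply PySem.List.foldl_congr_mem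
  intro nb level _
  have hcur : ∀ (init : PySem.Set (Int × Int)),
      (PySem.List.pyRange 0 5 1).foldl (fun cur y =>
        (PySem.List.pyRange 0 5 1).foldl (fun cur x =>
          if x = 2 ∧ y = 2 then cur
          else
            let adj := (recursive_neighbors x y level).foldl (fun adj n =>
              if (PySem.Dict.mk bugs).contains n.2.2 && decide ((n.1, n.2.1) ∈ (PySem.Dict.mk bugs).getD n.2.2 []) then adj + 1 else adj) (0:Int)
            let occupied := (PySem.Dict.mk bugs).contains level && decide ((x, y) ∈ (PySem.Dict.mk bugs).getD level [])
            let cur := if occupied && (adj == 1) then PySem.Set.add cur (x, y) else cur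
            if !occupied && (adj == 1 || adj == 2) then PySem.Set.add cur (x, y) else cur) cur) init
      = (PySem.List.pyRange 0 5 1).foldl (fun cur y =>
        (PySem.List.pyRange 0 5 1).foldl (fun cur x =>
          if x = 2 ∧ y = 2 then cur
          else
            let adj := (bugs.foldl (fun counts e =>
              e.2.foldl (fun counts p =>
                if (0 ≤ p.1 ∧ p.1 ≤ 4 ∧ 0 ≤ p.2 ∧ p.2 ≤ 4) ∧ ¬(p.1 = 2 ∧ p.2 = 2) then
                  (recursive_neighbors p.1 p.2 e.1).foldl (fun counts n => counts.insert n (counts.getD n 0 + 1)) counts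
                else counts) counts) (PySem.Dict.empty : PySem.Dict (Int × Int × Int) Int)).getD (x, y, level) 0
            if (if decide ((x, y) ∈ (PySem.Dict.mk bugs).getD level []) then adj == 1 else (adj == 1 || adj == 2)) then
              PySem.Set.add cur (x, y)
            else cur) cur) init := by
    intro init
    apply PySem.List.foldl_congr_mem
    intro cur yv hy
    apply PySem.List.foldl_congr_mem
    intro cur2 xv hx
    by_cases hxy : xv = 2 ∧ yv = 2
    · rw [if_pos hxy, if_pos hxy]
    · rw [if_neg hxy, if_neg hxy]
      have hby := (PySem.List.mem_pyRange_one).mp hy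
      have hbx := (PySem.List.mem_pyRange_one).mp hx
      have hvc : (xv, yv) ∈ pvVC := (pvVC_iff xv yv).mpr ⟨⟨hbx.1, by omega, hby.1, by omega⟩, hxy⟩
      have hadj : (recursive_neighbors xv yv level).foldl (fun adj n =>
            if (PySem.Dict.mk bugs).contains n.2.2 && decide ((n.1, n.2.1) ∈ (PySem.Dict.mk bugs).getD n.2.2 []) then adj + 1 else adj) (0:Int)
          = (bugs.foldl (fun counts e =>
              e.2.foldl (fun counts p =>
                if (0 ≤ p.1 ∧ p.1 ≤ 4 ∧ 0 ≤ p.2 ∧ p.2 ≤ 4) ∧ ¬(p.1 = 2 ∧ p.2 = 2) then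
                  (recursive_neighbors p.1 p.2 e.1).foldl (fun counts n => counts.insert n (counts.getD n 0 + 1)) counts
                else counts) counts) (PySem.Dict.empty : PySem.Dict (Int × Int × Int) Int)).getD (xv, yv, level) 0 := by
        rw [PySem.List.foldl_if_add_one, zero_add, pvAdj_eq bugs xv yv level hk hp hvc, pvCnt_outer]
        simp
      simp only []
      rw [hadj, pvOccupied_eq bugs level (xv, yv), pvBranch_eq]
  rw [hcur]
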